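-- pv_equiv track=rewrite | github.com/tytusdb/tytusdb | parser/fase2/team26/G26/optimizar.py | operandos
-- ===== SOURCE A (Python) =====
-- def operandos(texto):
--     newText = ""
--     flag = False
--     for i in texto:
--         if i == "=":
--             flag = True
--         if flag and i !="=":
--             if i != " ":
--                 newText += i
--     return newText
-- ===== SOURCE B (Python) =====
-- def operandos(texto):
--     parts = texto.split("=")
--     return "".join(parts[1:]).replace(" ", "")
-- ===== Notes on version B (the rewrite author's own statement) =====
-- stated objective: simpler
-- what changed: Replaces the single stateful flag-scan with delimiter decomposition: split the string at every '=', join all pieces after the first (dropping every separator at once), then delete spaces with one replace.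
import Mathlib
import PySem

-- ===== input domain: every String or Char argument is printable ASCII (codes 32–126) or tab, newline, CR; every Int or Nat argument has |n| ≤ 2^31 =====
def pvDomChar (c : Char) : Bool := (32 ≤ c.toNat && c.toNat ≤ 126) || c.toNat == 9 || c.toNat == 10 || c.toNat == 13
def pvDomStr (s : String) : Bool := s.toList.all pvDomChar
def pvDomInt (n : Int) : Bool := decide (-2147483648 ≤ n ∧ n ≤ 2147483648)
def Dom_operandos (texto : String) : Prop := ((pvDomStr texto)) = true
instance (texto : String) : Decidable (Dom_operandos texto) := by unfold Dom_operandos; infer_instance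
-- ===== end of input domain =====

-- B is simpler: it splits the string at every '=' and joins all pieces after the
-- first, then deletes spaces with one replace — no per-character flag state.

-- ===== PORT A =====
-- A's loop: state (newText, flag); flag set when '=' seen; append non-'=' non-' ' chars once flag set.
def operandosStep (st : List Char × Bool) (i : Char) : List Char × Bool :=
  let flag := if i = '=' then true else st.2
  if flag ∧ i ≠ '=' then
    (if i ≠ ' ' then (st.1 ++ [i], flag) else (st.1, flag))
  else (st.1, flag)

def operandos (texto : String) : String :=
  String.ofList (texto.toList.foldl operandosStep ([], false)).1

-- ===== PORT B =====
-- parts = texto.split("=")  → List.splitOn '=' (exact for a one-char separator: pieces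
--   left to right, empty pieces kept); "".join(parts[1:]) → flatten of (parts.drop 1);
-- .replace(" ", "") → filter (≠ ' ') (exact: one-char needle, empty replacement removes
--   every occurrence of ' ').
def operandos_alt (texto : String) : String :=
  String.ofList ((((texto.toList.splitOn '=').drop 1).flatten).filter (fun c => ¬ c = ' '))

-- ===== PRECONDITION & SPEC =====
def Spec_operandos (texto : String) (out : String) : Prop := out = operandos_alt texto
instance (texto : String) (out : String) : Decidable (Spec_operandos texto out) := by unfold Spec_operandos; infer_instance

-- ===== CLAIM (what is proved, stated in full; the proofs are below) =====
def Claim_equal_operandos : Prop := ∀ (texto : String), Dom_operandos texto → Spec_operandos texto (operandos texto)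

-- ===== LEMMAS AND PROOFS =====

-- Once the flag is true, the remaining loop is exactly a filter.
theorem operandos_fold_true (l : List Char) (acc : List Char) :
    l.foldl operandosStep (acc, true)
      = (acc ++ l.filter (fun c => ¬ c = ' ' ∧ ¬ c = '='), true) := by
  induction l generalizing acc with
  | nil => simp
  | cons i t ih =>
    by_cases hi : i = '='
    · subst hi; simpa [operandosStep] using ih acc
    · by_cases hs : i = ' '
      · subst hs; simpa [operandosStep] using ih acc
      · simp [operandosStep, hi, hs, ih]

-- Before the flag is set, the loop skips chars until the first '=', then filters the rest.
theorem operandos_fold_false (l : List Char) (acc : List Char) :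
    (l.foldl operandosStep (acc, false)).1
      = acc ++ ((l.dropWhile (fun c => ¬ c = '=')).drop 1).filter
          (fun c => ¬ c = ' ' ∧ ¬ c = '=') := by
  induction l generalizing acc with
  | nil => simp
  | cons i t ih =>
    by_cases hi : i = '='
    · subst hi
      simp [operandosStep, List.dropWhile, operandos_fold_true]
    · simp [operandosStep, hi, List.dropWhile, ih]

-- Flattening ALL pieces of splitOn removes exactly the separators.
theorem flatten_splitOn (l : List Char) :
    (l.splitOnP (fun c => c == '=')).flatten = l.filter (fun c => ¬ c = '=') := by
  induction l with
  | nil => simp [List.splitOnP_nil]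
  | cons x t ih =>
    rw [List.splitOnP_cons]
    by_cases hx : x = '='
    · subst hx
      rw [if_pos (by simp), List.flatten_cons, List.nil_append, ih,
        List.filter_cons_of_neg (by simp)]
    · rw [if_neg (by simp [hx]), List.filter_cons_of_pos (by simp [hx])]
      obtain ⟨p, ps, h⟩ := List.exists_cons_of_ne_nil
        (List.splitOnP_ne_nil (fun c => c == '=') t)
      rw [h] at ih ⊢
      rw [List.modifyHead_cons, List.flatten_cons]
      rw [List.flatten_cons] at ih
      rw [List.cons_append, ih]

-- Dropping the head piece of splitOn and flattening = everything after the first '=', all '='s removed.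
theorem flatten_drop_splitOn (l : List Char) :
    ((l.splitOnP (fun c => c == '=')).drop 1).flatten
      = ((l.dropWhile (fun c => ¬ c = '=')).drop 1).filter (fun c => ¬ c = '=') := by
  induction l with
  | nil => simp [List.splitOnP_nil]
  | cons x t ih =>
    rw [List.splitOnP_cons]
    by_cases hx : x = '='
    · subst hx
      rw [if_pos (by simp), List.drop_one, List.tail_cons, flatten_splitOn,
        List.dropWhile_cons_of_neg (by simp), List.drop_one, List.tail_cons]
    · rw [if_neg (by simp [hx])]
      obtain ⟨p, ps, h⟩ := List.exists_cons_of_ne_nil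
        (List.splitOnP_ne_nil (fun c => c == '=') t)
      rw [h] at ih ⊢
      rw [List.drop_one, List.tail_cons] at ih
      rw [List.modifyHead_cons, List.drop_one, List.tail_cons,
        List.dropWhile_cons_of_pos (by simp [hx])]
      exact ih

-- ===== VERDICT (by name: the statement is the Claim_ definition above) =====
theorem operandos_spec : Claim_equal_operandos := by
  intro texto _
  unfold Spec_operandos operandos operandos_alt
  rw [operandos_fold_false]
  simp only [List.splitOn]
  rw [flatten_drop_splitOn, List.filter_filter, List.nil_append]
  congr 1
  apply List.filter_congr
  intro c _
  by_cases h1 : c = ' ' <;> by_cases h2 : c = '=' <;> simp [h1, h2]
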